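-- pv_equiv track=rewrite | github.com/chokun17872/Computer-Programming-for-Computer-Engineers | Problem Solving/7.py | solve
-- ===== SOURCE A (Python) =====
-- def solve(elev,st):
--     total = 0
--     while len(elev) > 0:
--         mn_diff = 99999999
--         for floor in elev:
--             diff = abs(st-floor)
--             if diff < mn_diff:
--                 mn_diff = diff
--                 new_st = floor
--         st = new_st
--         total += mn_diff
--         elev.remove(st)
--     return total
-- ===== SOURCE B (Python) =====
-- def solve(elev, st):
--     # Sort floors once (floor, original index); the nearest remaining floor is
--     # always one of the two floors adjacent to the visited block, so a single
--     # zipper walk over the sorted list replaces A's repeated full scans.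
--     pairs = sorted(zip(elev, range(len(elev))))
--     k = 0
--     while k < len(pairs) and pairs[k][0] < st:
--         k += 1
--     left = sorted(pairs[:k], key=lambda p: (-p[0], p[1]))  # below st: nearest floor first, earliest copy first
--     right = pairs[k:]                                      # at/above st: nearest floor first, earliest copy first
--     total = 0
--     pos = st
--     while left or right:
--         if not left:
--             take_left = False
--         elif not right:
--             take_left = True
--         else:
--             dl = pos - left[0][0]
--             dr = right[0][0] - pos
--             take_left = dl < dr or (dl == dr and left[0][1] < right[0][1])
--         if take_left:
--             v, _ = left.pop(0)
--             total += pos - v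
--         else:
--             v, _ = right.pop(0)
--             total += v - pos
--         pos = v
--     return total
-- ===== Notes on version B (the rewrite author's own statement) =====
-- stated objective: faster
-- what changed: A rescans the whole remaining list for the nearest floor and removes it each round (quadratic); B sorts the floors once with their original indices and walks a two-list zipper from the start position, since the nearest remaining floor is always adjacent to the already-visited block (distance ties broken by earliest original index, as A's first-occurrence scan does).
-- outside the precondition, e.g. on solve([0, 99000000, 198000000], 0): A returns 198000000, B returns 198000000; on solve([100000000], 0): A raises UnboundLocalError, B returns 100000000
import Mathlib
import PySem

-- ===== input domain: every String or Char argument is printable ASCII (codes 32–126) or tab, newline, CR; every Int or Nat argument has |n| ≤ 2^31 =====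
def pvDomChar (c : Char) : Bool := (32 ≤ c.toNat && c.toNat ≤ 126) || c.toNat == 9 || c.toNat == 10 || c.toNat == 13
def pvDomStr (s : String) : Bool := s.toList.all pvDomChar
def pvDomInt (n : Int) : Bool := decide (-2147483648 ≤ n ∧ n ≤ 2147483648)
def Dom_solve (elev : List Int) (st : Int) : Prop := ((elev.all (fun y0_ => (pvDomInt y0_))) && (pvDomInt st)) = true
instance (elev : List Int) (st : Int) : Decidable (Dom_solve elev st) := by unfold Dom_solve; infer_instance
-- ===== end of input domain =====

-- B replaces A's repeated full scans by one sort plus a two-list zipper walk; equivalence is about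
-- the RETURN value only (the Python A empties its `elev` argument in place, B does not mutate it).

-- ===== PORT A =====
-- the inner `for floor in elev` scan: state = (mn_diff, new_st); new_st unassigned = none
def pvAScan (st : Int) (elev : List Int) : Int × Option Int :=
  elev.foldl (fun acc floor => if |st - floor| < acc.1 then (|st - floor|, some floor) else acc)
    (99999999, none)

-- the `while len(elev) > 0` loop; fuel = len(elev) (one element is removed per round)
def pvALoop : Nat → List Int → Int → Int → Int
  | 0, _, _, total => total
  | fuel+1, elev, st, total =>
    if elev.isEmpty then total
    else
      match pvAScan st elev with
      | (mn, some nst) =>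
        match PySem.List.remove? elev nst with
        | some elev' => pvALoop fuel elev' nst (total + mn)
        | none => total + mn          -- Python raises ValueError here (excluded by Pre_solve)
      | (_, none) => total            -- Python raises NameError here (excluded by Pre_solve)

def solve (elev : List Int) (st : Int) : Int := pvALoop elev.length elev st 0

-- ===== PORT B =====
-- the zipper walk: left = floors below st (nearest value first, earliest copy first),
-- right = floors at/above st (likewise)
def pvBLoop : List (Int × Int) → List (Int × Int) → Int → Int → Int
  | [], [], _, total => total
  | [], r :: rt, pos, total => pvBLoop [] rt r.1 (total + (r.1 - pos))
  | l :: lt, [], pos, total => pvBLoop lt [] l.1 (total + (pos - l.1))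
  | l :: lt, r :: rt, pos, total =>
    if pos - l.1 < r.1 - pos ∨ (pos - l.1 = r.1 - pos ∧ l.2 < r.2)
    then pvBLoop lt (r :: rt) l.1 (total + (pos - l.1))
    else pvBLoop (l :: lt) rt r.1 (total + (r.1 - pos))
termination_by l r => l.length + r.length

def solve_alt (elev : List Int) (st : Int) : Int :=
  -- Source B: pairs = sorted(zip(elev, range(len(elev)))) — lexicographic, ported as sorted2
  let pairs := PySem.List.sorted2 (elev.zip (PySem.List.pyRange 0 (elev.length : Int) 1))
    (fun p => p.1) (fun p => p.2) false
  -- Source B finds k = length of the maximal prefix with value < st and slices; exact as takeWhile/dropWhile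
  let pref := pairs.takeWhile (fun p => decide (p.1 < st))
  let left := PySem.List.sorted2 pref (fun p => -p.1) (fun p => p.2) false
  let right := pairs.dropWhile (fun p => decide (p.1 < st))
  pvBLoop left right st 0

-- ===== PRECONDITION & SPEC =====
-- Pre_ excludes inputs where some floor is at distance ≥ 99999999 from the start or from another
-- floor (A's search sentinel). A raises NameError/ValueError whenever a traversal step meets the
-- sentinel; which steps occur depends on the whole traversal, so this closed-form bound is wider
-- than the exact raise set and also excludes some inputs on which A returns and agrees with B.
def Pre_solve (elev : List Int) (st : Int) : Prop :=
  (∀ x ∈ elev, |st - x| < 99999999) ∧ (∀ a ∈ elev, ∀ b ∈ elev, |a - b| < 99999999)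
instance (elev : List Int) (st : Int) : Decidable (Pre_solve elev st) := by unfold Pre_solve; infer_instance

def pvWitness_solve : List Int × Int := ([1, 5, 2], 3)

def Spec_solve (elev : List Int) (st : Int) (out : Int) : Prop := out = solve_alt elev st
instance (elev : List Int) (st : Int) (out : Int) : Decidable (Spec_solve elev st out) := by unfold Spec_solve; infer_instance

-- ===== CLAIM (what is proved, stated in full; the proofs are below) =====
def Claim_equal_solve : Prop := ∀ (elev : List Int) (st : Int), Dom_solve elev st → Pre_solve elev st → Spec_solve elev st (solve elev st)

-- ===== LEMMAS AND PROOFS =====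

-- characterisation of A's inner scan: it returns the initial state when nothing beats c, and
-- otherwise the FIRST element achieving the final minimum distance
lemma pvAScan_char (pos : Int) : ∀ (l : List Int) (c : Int) (o : Option Int),
    ((∀ x ∈ l, c ≤ |pos - x|) ∧
      l.foldl (fun acc floor => if |pos - floor| < acc.1 then (|pos - floor|, some floor) else acc) (c, o) = (c, o)) ∨
    (∃ pre w suf, l = pre ++ w :: suf ∧ |pos - w| < c ∧
      (∀ y ∈ pre, |pos - w| < |pos - y|) ∧ (∀ y ∈ suf, |pos - w| ≤ |pos - y|) ∧
      l.foldl (fun acc floor => if |pos - floor| < acc.1 then (|pos - floor|, some floor) else acc) (c, o) = (|pos - w|, some w)) := by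
  intro l
  induction l with
  | nil => intro c o; left; simp
  | cons x xs ih =>
    intro c o
    simp only [List.foldl_cons]
    by_cases h : |pos - x| < c
    · rw [if_pos h]
      rcases ih (|pos - x|) (some x) with ⟨h1, h2⟩ | ⟨pre, w, suf, hsp, hlt, hpre, hsuf, heq⟩
      · right
        exact ⟨[], x, xs, by simp, h, by simp, h1, h2⟩
      · right
        refine ⟨x :: pre, w, suf, by simp [hsp], lt_trans hlt h, ?_, hsuf, heq⟩
        intro y hy
        rcases List.mem_cons.mp hy with rfl | hy'
        · exact hlt
        · exact hpre y hy'
    · rw [if_neg h]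
      rcases ih c o with ⟨h1, h2⟩ | ⟨pre, w, suf, hsp, hlt, hpre, hsuf, heq⟩
      · left
        refine ⟨?_, h2⟩
        intro y hy
        rcases List.mem_cons.mp hy with rfl | hy'
        · omega
        · exact h1 y hy'
      · right
        refine ⟨x :: pre, w, suf, by simp [hsp], hlt, ?_, hsuf, heq⟩
        intro y hy
        rcases List.mem_cons.mp hy with rfl | hy'
        · omega
        · exact hpre y hy'

-- removing the value of a FIRST-occurrence pair from the fst-projection of an index-sorted pair list
lemma remove_map_fst' : ∀ (rem : List (Int × Int)), rem.Pairwise (fun a b => a.2 < b.2) →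
    ∀ p ∈ rem, (∀ q ∈ rem, q.1 = p.1 → p.2 ≤ q.2) →
    PySem.List.remove? (rem.map Prod.fst) p.1 = some ((rem.erase p).map Prod.fst) := by
  intro rem
  induction rem with
  | nil => intro _ p hp; cases hp
  | cons a t ih =>
    intro hpw p hp hfirst
    rcases List.mem_cons.mp hp with rfl | hp'
    · simp [PySem.List.remove?_cons_self, List.erase_cons_head]
    · have hane : a.1 ≠ p.1 := by
        intro h
        have h1 := hfirst a List.mem_cons_self h
        have h2 := (List.pairwise_cons.mp hpw).1 p hp'
        omega
      have hanep : a ≠ p := fun h => hane (by rw [h])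
      simp only [List.map_cons]
      rw [PySem.List.remove?_cons_of_ne _ hane,
        ih (List.pairwise_cons.mp hpw).2 p hp'
          (fun q hq hq1 => hfirst q (List.mem_cons_of_mem a hq) hq1),
        List.erase_cons_tail (by simp [hanep])]
      simp

-- in an index-sorted pair list, any pair whose value is absent from `pre` and differs from the
-- split value w sits after the split, so some pair carrying w has a smaller index
lemma first_occ_lt (rem : List (Int × Int)) (hpw : rem.Pairwise (fun a b => a.2 < b.2))
    (pre suf : List Int) (w : Int) (hsp : rem.map Prod.fst = pre ++ w :: suf)
    (p : Int × Int) (hp : p ∈ rem) (hpw1 : p.1 ≠ w) (hppre : p.1 ∉ pre) :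
    ∃ q' ∈ rem, q'.1 = w ∧ q'.2 < p.2 := by
  obtain ⟨l1, l2, hrem, hl1, hl2⟩ := List.map_eq_append_iff.mp hsp
  obtain ⟨q', l2', rfl, hq1, hl2'⟩ := List.map_eq_cons_iff.mp hl2
  have hq'mem : q' ∈ rem := by rw [hrem]; simp
  have hploc : p ∈ l2' := by
    rw [hrem] at hp
    rcases List.mem_append.mp hp with h | h
    · exact absurd (hl1 ▸ List.mem_map_of_mem (f := Prod.fst) h) hppre
    · rcases List.mem_cons.mp h with rfl | h
      · exact absurd hq1 hpw1
      · exact h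
  rw [hrem] at hpw
  have h2 := (List.pairwise_append.mp hpw).2.1
  exact ⟨q', hq'mem, hq1, (List.pairwise_cons.mp h2).1 p hploc⟩

lemma pairwise_mem_rel {α : Type} {R : α → α → Prop} :
    ∀ {l : List α} {a b : α}, l.Pairwise R → a ∈ l → b ∈ l → a = b ∨ R a b ∨ R b a := by
  intro l a b h ha hb
  induction h with
  | nil => cases ha
  | cons hr _ ih =>
    rcases List.mem_cons.mp ha with rfl | ha' <;> rcases List.mem_cons.mp hb with rfl | hb'
    · exact Or.inl rfl
    · exact Or.inr (Or.inl (hr _ hb'))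
    · exact Or.inr (Or.inr (hr _ ha'))
    · exact ih ha' hb'

-- insertion with a strictly asymmetric, transitive `before` keeps the list sorted
lemma pairwise_insertBy_of {α : Type} (before : α → α → Bool)
    (hasym : ∀ a b, before a b = true → before b a = false)
    (htrans : ∀ a b c, before a b = true → before b c = true → before a c = true)
    (x : α) : ∀ acc : List α, acc.Pairwise (fun a b => before b a = false) →
      (PySem.List.insertBy before x acc).Pairwise (fun a b => before b a = false) := by
  intro acc
  induction acc with
  | nil => intro _; simp [PySem.List.insertBy]
  | cons y ys ih =>
    intro hpw
    rw [List.pairwise_cons] at hpw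
    simp only [PySem.List.insertBy]
    by_cases h : before x y = true
    · rw [if_pos h]
      refine List.pairwise_cons.mpr ⟨?_, List.pairwise_cons.mpr ⟨hpw.1, hpw.2⟩⟩
      intro z hz
      rcases List.mem_cons.mp hz with rfl | hz'
      · exact hasym x z h
      · by_contra hzx
        have hzx' : before z x = true := by
          cases hb : before z x
          · exact absurd hb hzx
          · rfl
        have := htrans z x y hzx' h
        rw [hpw.1 z hz'] at this
        cases this
    · rw [if_neg h]
      refine List.pairwise_cons.mpr ⟨?_, ih hpw.2⟩
      intro z hz
      rcases (PySem.List.mem_insertBy _ _ _ _).mp hz with rfl | hz'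
      · cases hb : before z y
        · rfl
        · exact absurd hb h
      · exact hpw.1 z hz'

lemma pairwise_foldl_insertBy {α : Type} (before : α → α → Bool)
    (hasym : ∀ a b, before a b = true → before b a = false)
    (htrans : ∀ a b c, before a b = true → before b c = true → before a c = true) :
    ∀ (xs acc : List α), acc.Pairwise (fun a b => before b a = false) →
      (xs.foldl (fun acc x => PySem.List.insertBy before x acc) acc).Pairwise
        (fun a b => before b a = false) := by
  intro xs
  induction xs with
  | nil => intro acc h; exact h
  | cons x t ih =>
    intro acc h
    exact ih _ (pairwise_insertBy_of before hasym htrans x acc h)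

-- sorted2 output is sorted by its lexicographic (k1, k2) key
lemma sorted2_pairwise_lexle (xs : List (Int × Int)) (k1 k2 : Int × Int → Int) :
    (PySem.List.sorted2 xs k1 k2 false).Pairwise
      (fun a b => k1 a < k1 b ∨ (k1 a = k1 b ∧ k2 a ≤ k2 b)) := by
  have hb : ∀ a b : Int × Int,
      ((fun a b => decide (k1 a < k1 b) || (!decide (k1 b < k1 a) && decide (k2 a < k2 b))) a b = true)
      ↔ (k1 a < k1 b ∨ (¬ k1 b < k1 a ∧ k2 a < k2 b)) := by
    intro a b; simp
  have hasym : ∀ a b : Int × Int, (fun a b => decide (k1 a < k1 b) || (!decide (k1 b < k1 a) && decide (k2 a < k2 b))) a b = true →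
      (fun a b => decide (k1 a < k1 b) || (!decide (k1 b < k1 a) && decide (k2 a < k2 b))) b a = false := by
    intro a b h
    rw [hb] at h
    simp only [Bool.or_eq_false_iff, Bool.and_eq_false_iff]
    constructor
    · simp; omega
    · simp; omega
  have htrans : ∀ a b c : Int × Int, (fun a b => decide (k1 a < k1 b) || (!decide (k1 b < k1 a) && decide (k2 a < k2 b))) a b = true →
      (fun a b => decide (k1 a < k1 b) || (!decide (k1 b < k1 a) && decide (k2 a < k2 b))) b c = true →
      (fun a b => decide (k1 a < k1 b) || (!decide (k1 b < k1 a) && decide (k2 a < k2 b))) a c = true := by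
    intro a b c h1 h2
    rw [hb] at h1 h2 ⊢
    omega
  have h := pairwise_foldl_insertBy _ hasym htrans xs [] (by simp)
  have hdef : PySem.List.sorted2 xs k1 k2 false
      = xs.foldl (fun acc x => PySem.List.insertBy
          (fun a b => decide (k1 a < k1 b) || (!decide (k1 b < k1 a) && decide (k2 a < k2 b))) x acc) [] := by
    simp [PySem.List.sorted2]
  rw [hdef]
  refine h.imp ?_
  intro a b hab
  have : ¬ (k1 b < k1 a ∨ (¬ k1 a < k1 b ∧ k2 b < k2 a)) := by
    rw [← hb b a]
    simp [hab]
  omega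

-- the main loop invariant: A's remaining list is `rem` (original order, index-sorted), and B's
-- zipper (left, right) is a value-split of the same pairs around pos, each side ordered
-- nearest-value-first with equal values ordered by original index
lemma loop_eq : ∀ (n : Nat) (rem left right : List (Int × Int)) (pos total : Int),
    rem.length = n →
    rem.Pairwise (fun a b => a.2 < b.2) →
    (left ++ right).Perm rem →
    left.Pairwise (fun a b => b.1 < a.1 ∨ (a.1 = b.1 ∧ a.2 < b.2)) →
    right.Pairwise (fun a b => a.1 < b.1 ∨ (a.1 = b.1 ∧ a.2 < b.2)) →
    (∀ p ∈ left, p.1 ≤ pos) →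
    (∀ p ∈ right, pos ≤ p.1) →
    (∀ p ∈ left, ∀ q ∈ right, p.1 < q.1) →
    (∀ p ∈ rem, |pos - p.1| < 99999999) →
    (∀ p ∈ rem, ∀ q ∈ rem, |p.1 - q.1| < 99999999) →
    pvALoop n (rem.map Prod.fst) pos total = pvBLoop left right pos total := by
  intro n
  induction n with
  | zero =>
    intro rem left right pos total hlen _ hperm _ _ _ _ _ _ _
    have hrem : rem = [] := List.length_eq_zero_iff.mp hlen
    subst hrem
    have h0 : left ++ right = [] := hperm.eq_nil
    rcases List.append_eq_nil_iff.mp h0 with ⟨hl, hr⟩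
    subst hl; subst hr
    simp [pvALoop, pvBLoop]
  | succ m ih =>
    intro rem left right pos total hlen hpw hperm hlpw hrpw hlval hrval hI7 hbnd hpair
    have hremne : rem ≠ [] := by intro h; subst h; simp at hlen
    have helemne : rem.map Prod.fst ≠ [] := by simpa using hremne
    have hLmem : ∀ p ∈ left, p ∈ rem := fun p hp =>
      hperm.mem_iff.mp (List.mem_append.mpr (Or.inl hp))
    have hRmem : ∀ p ∈ right, p ∈ rem := fun p hp =>
      hperm.mem_iff.mp (List.mem_append.mpr (Or.inr hp))
    have hmemLR : ∀ p ∈ rem, p ∈ left ∨ p ∈ right := by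
      intro p hp
      exact List.mem_append.mp (hperm.mem_iff.mpr hp)
    rcases pvAScan_char pos (rem.map Prod.fst) 99999999 none with ⟨hall, _⟩ | ⟨pre, w, suf, hsp, hwlt, hpre, hsuf, heq⟩
    · exfalso
      obtain ⟨p, hp⟩ : ∃ p, p ∈ rem := by
        cases rem with
        | nil => exact absurd rfl hremne
        | cons a t => exact ⟨a, List.mem_cons_self⟩
      have h1 := hall p.1 (List.mem_map_of_mem hp)
      have h2 := hbnd p hp
      linarith
    have hscan : pvAScan pos (rem.map Prod.fst) = (|pos - w|, some w) := heq
    have hwmem : w ∈ rem.map Prod.fst := by rw [hsp]; simp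
    obtain ⟨wp, hwpmem, hwp1⟩ := List.mem_map.mp hwmem
    have hminw : ∀ y ∈ rem.map Prod.fst, |pos - w| ≤ |pos - y| := by
      intro y hy
      rw [hsp] at hy
      rcases List.mem_append.mp hy with h | h
      · exact le_of_lt (hpre y h)
      · rcases List.mem_cons.mp h with rfl | h
        · exact le_refl _
        · exact hsuf y h
    have hdiffL : ∀ p ∈ left, |pos - p.1| = pos - p.1 := fun p hp => by
      have := hlval p hp; rw [abs_of_nonneg (by omega)]
    have hdiffR : ∀ p ∈ right, |pos - p.1| = p.1 - pos := fun p hp => by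
      have := hrval p hp; rw [abs_of_nonpos (by omega)]; ring
    -- generic A-side step
    have hAstep : ∀ (cand : Int × Int), cand ∈ rem → (∀ q ∈ rem, q.1 = cand.1 → cand.2 ≤ q.2) →
        w = cand.1 →
        pvALoop (m+1) (rem.map Prod.fst) pos total
          = pvALoop m ((rem.erase cand).map Prod.fst) cand.1 (total + |pos - w|) := by
      intro cand hc hfirst hwc
      have hrm := remove_map_fst' rem hpw cand hc hfirst
      simp only [pvALoop]
      rw [if_neg (by simpa using helemne), hscan, hwc]
      show (match PySem.List.remove? (List.map Prod.fst rem) cand.1 with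
            | some elev' => pvALoop m elev' cand.1 (total + |pos - cand.1|)
            | none => total + |pos - cand.1|) = _
      rw [hrm]
    -- erase preserves the structural invariants
    have hpwE : ∀ cand : Int × Int, (rem.erase cand).Pairwise (fun a b => a.2 < b.2) :=
      fun cand => hpw.sublist List.erase_sublist
    have hlenE : ∀ cand ∈ rem, (rem.erase cand).length = m := by
      intro cand hc
      rw [List.length_erase_of_mem hc, hlen]
      omega
    have hbndE : ∀ cand ∈ rem, ∀ p ∈ rem.erase cand, |cand.1 - p.1| < 99999999 :=
      fun cand hc p hp => hpair cand hc p (List.mem_of_mem_erase hp)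
    have hpairE : ∀ cand : Int × Int, ∀ p ∈ rem.erase cand, ∀ q ∈ rem.erase cand, |p.1 - q.1| < 99999999 :=
      fun _ p hp q hq => hpair p (List.mem_of_mem_erase hp) q (List.mem_of_mem_erase hq)
    cases left with
    | nil =>
     cases right with
     | nil =>
      exfalso
      have hpn : ([] : List (Int × Int)).Perm rem := by simpa using hperm
      exact hremne (hpn.symm.eq_nil)
     | cons rh rt =>
      have hrhmem : rh ∈ rem := hRmem rh List.mem_cons_self
      have hRge : ∀ p ∈ rh :: rt, rh.1 ≤ p.1 := by
        intro p hp
        rcases List.mem_cons.mp hp with rfl | hp'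
        · exact le_refl _
        · have := (List.pairwise_cons.mp hrpw).1 p hp'
          omega
      have hRfirst : ∀ q ∈ rem, q.1 = rh.1 → rh.2 ≤ q.2 := by
        intro q hq hq1
        rcases hmemLR q hq with h | h
        · cases h
        · rcases List.mem_cons.mp h with rfl | h'
          · exact le_refl _
          · have := (List.pairwise_cons.mp hrpw).1 q h'
            omega
      have hwright : wp ∈ rh :: rt := by
        rcases hmemLR wp hwpmem with h | h
        · cases h
        · exact h
      have hwc : w = rh.1 := by
        have h1 := hminw rh.1 (List.mem_map_of_mem hrhmem)
        have h2 := hdiffR rh List.mem_cons_self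
        have h3 := hdiffR wp hwright
        have h4 := hRge wp hwright
        rw [← hwp1] at h1 ⊢
        rw [h3, h2] at h1
        omega
      have hperm' : (([] : List (Int × Int)) ++ rt).Perm (rem.erase rh) := by
        have h5 : (rh :: rt).Perm rem := by simpa using hperm
        have h6 := (h5.symm).erase rh
        rw [List.erase_cons_head] at h6
        simpa using h6.symm
      have harec := ih (rem.erase rh) [] rt rh.1 (total + |pos - w|)
        (hlenE rh hrhmem) (hpwE rh) hperm' (by simp) ((List.pairwise_cons.mp hrpw).2)
        (by simp) (fun p hp => hRge p (List.mem_cons_of_mem rh hp)) (by simp)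
        (fun p hp => hbndE rh hrhmem p hp) (hpairE rh)
      rw [hAstep rh hrhmem hRfirst hwc, harec]
      have htot : |pos - w| = rh.1 - pos := by rw [hwc]; exact hdiffR rh List.mem_cons_self
      rw [htot]
      simp [pvBLoop]
    | cons lh lt =>
     have hlhmem : lh ∈ rem := hLmem lh List.mem_cons_self
     have hLle : ∀ p ∈ lh :: lt, p.1 ≤ lh.1 := by
       intro p hp
       rcases List.mem_cons.mp hp with rfl | hp'
       · exact le_refl _
       · have := (List.pairwise_cons.mp hlpw).1 p hp'
         omega
     have hLfirst : ∀ q ∈ rem, q.1 = lh.1 → lh.2 ≤ q.2 := by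
       intro q hq hq1
       rcases hmemLR q hq with h | h
       · rcases List.mem_cons.mp h with rfl | h'
         · exact le_refl _
         · have := (List.pairwise_cons.mp hlpw).1 q h'
           omega
       · have := hI7 lh List.mem_cons_self q h
         omega
     cases right with
     | nil =>
      have hwleft : wp ∈ lh :: lt := by
        rcases hmemLR wp hwpmem with h | h
        · exact h
        · cases h
      have hwc : w = lh.1 := by
        have h1 := hminw lh.1 (List.mem_map_of_mem hlhmem)
        have h2 := hdiffL lh List.mem_cons_self
        have h3 := hdiffL wp hwleft
        have h4 := hLle wp hwleft
        rw [← hwp1] at h1 ⊢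
        rw [h3, h2] at h1
        omega
      have hperm' : (lt ++ ([] : List (Int × Int))).Perm (rem.erase lh) := by
        have h5 : (lh :: (lt ++ [])).Perm rem := by simpa using hperm
        have h6 := (h5.symm).erase lh
        rw [List.erase_cons_head] at h6
        simpa using h6.symm
      have harec := ih (rem.erase lh) lt [] lh.1 (total + |pos - w|)
        (hlenE lh hlhmem) (hpwE lh) hperm' ((List.pairwise_cons.mp hlpw).2) (by simp)
        (fun p hp => hLle p (List.mem_cons_of_mem lh hp)) (by simp) (by simp)
        (fun p hp => hbndE lh hlhmem p hp) (hpairE lh)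
      rw [hAstep lh hlhmem hLfirst hwc, harec]
      have htot : |pos - w| = pos - lh.1 := by rw [hwc]; exact hdiffL lh List.mem_cons_self
      rw [htot]
      simp [pvBLoop]
     | cons rh rt =>
      have hrhmem : rh ∈ rem := hRmem rh List.mem_cons_self
      have hRge : ∀ p ∈ rh :: rt, rh.1 ≤ p.1 := by
        intro p hp
        rcases List.mem_cons.mp hp with rfl | hp'
        · exact le_refl _
        · have := (List.pairwise_cons.mp hrpw).1 p hp'
          omega
      have hRfirst : ∀ q ∈ rem, q.1 = rh.1 → rh.2 ≤ q.2 := by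
        intro q hq hq1
        rcases hmemLR q hq with h | h
        · have := hI7 q h rh List.mem_cons_self
          omega
        · rcases List.mem_cons.mp h with rfl | h'
          · exact le_refl _
          · have := (List.pairwise_cons.mp hrpw).1 q h'
            omega
      have hdl := hdiffL lh List.mem_cons_self
      have hdr := hdiffR rh List.mem_cons_self
      have hminlh := hminw lh.1 (List.mem_map_of_mem hlhmem)
      have hminrh := hminw rh.1 (List.mem_map_of_mem hrhmem)
      have hnev : lh.1 < rh.1 := hI7 lh List.mem_cons_self rh List.mem_cons_self
      have hpermL : (lt ++ (rh :: rt)).Perm (rem.erase lh) := by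
        have h5 : (lh :: (lt ++ rh :: rt)).Perm rem := by simpa using hperm
        have h6 := (h5.symm).erase lh
        rw [List.erase_cons_head] at h6
        exact h6.symm
      have hpermR : ((lh :: lt) ++ rt).Perm (rem.erase rh) := by
        have h5 : ((lh :: lt) ++ rh :: rt).Perm rem := hperm
        have h6 : (rh :: ((lh :: lt) ++ rt)).Perm rem := (List.perm_middle).symm.trans h5
        have h7 := (h6.symm).erase rh
        rw [List.erase_cons_head] at h7
        exact h7.symm
      have hrecL : w = lh.1 →
          pvALoop (m+1) (rem.map Prod.fst) pos total
            = pvBLoop lt (rh :: rt) lh.1 (total + (pos - lh.1)) := by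
        intro hwc
        have harec := ih (rem.erase lh) lt (rh :: rt) lh.1 (total + |pos - w|)
          (hlenE lh hlhmem) (hpwE lh) hpermL ((List.pairwise_cons.mp hlpw).2) hrpw
          (fun p hp => hLle p (List.mem_cons_of_mem lh hp))
          (fun p hp => le_of_lt (hI7 lh List.mem_cons_self p hp))
          (fun p hp q hq => hI7 p (List.mem_cons_of_mem lh hp) q hq)
          (fun p hp => hbndE lh hlhmem p hp) (hpairE lh)
        rw [hAstep lh hlhmem hLfirst hwc, harec, hwc, hdl]
      have hrecR : w = rh.1 →
          pvALoop (m+1) (rem.map Prod.fst) pos total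
            = pvBLoop (lh :: lt) rt rh.1 (total + (rh.1 - pos)) := by
        intro hwc
        have harec := ih (rem.erase rh) (lh :: lt) rt rh.1 (total + |pos - w|)
          (hlenE rh hrhmem) (hpwE rh) hpermR hlpw ((List.pairwise_cons.mp hrpw).2)
          (fun p hp => le_of_lt (hI7 p hp rh List.mem_cons_self))
          (fun p hp => hRge p (List.mem_cons_of_mem rh hp))
          (fun p hp q hq => hI7 p hp q (List.mem_cons_of_mem rh hq))
          (fun p hp => hbndE rh hrhmem p hp) (hpairE rh)
        rw [hAstep rh hrhmem hRfirst hwc, harec, hwc, hdr]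
      rcases lt_trichotomy (pos - lh.1) (rh.1 - pos) with hcmp | hcmp | hcmp
      · -- left strictly nearer
        have hwc : w = lh.1 := by
          rw [hdl] at hminlh
          rcases hmemLR wp hwpmem with h | h
          · have h3 := hdiffL wp h
            have h4 := hLle wp h
            rw [← hwp1] at hminlh ⊢
            rw [h3] at hminlh
            omega
          · exfalso
            have h3 := hdiffR wp h
            have h4 := hRge wp h
            rw [← hwp1] at hminlh
            rw [h3] at hminlh
            omega
        rw [hrecL hwc]
        simp only [pvBLoop]
        rw [if_pos (Or.inl hcmp)]
      · -- tie: break by original index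
        have hlhne : lh ≠ rh := fun h => absurd (congrArg Prod.fst h) (by omega)
        have hwcand : w = lh.1 ∨ w = rh.1 := by
          rcases hmemLR wp hwpmem with h | h
          · left
            have h3 := hdiffL wp h
            have h4 := hLle wp h
            rw [hdl] at hminlh
            rw [← hwp1] at hminlh ⊢
            rw [h3] at hminlh
            omega
          · right
            have h3 := hdiffR wp h
            have h4 := hRge wp h
            rw [hdr] at hminrh
            rw [← hwp1] at hminrh ⊢
            rw [h3] at hminrh
            omega
        rcases pairwise_mem_rel hpw hlhmem hrhmem with h | hidx | hidx
        · exact absurd h hlhne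
        · -- lh has the smaller index: A takes lh
          have hwc : w = lh.1 := by
            rcases hwcand with h | h
            · exact h
            · exfalso
              have hlhnpre : lh.1 ∉ pre := by
                intro hh
                have h5 := hpre lh.1 hh
                have h6 : |pos - w| = rh.1 - pos := by rw [h]; exact hdr
                omega
              obtain ⟨q', hq'mem, hq'1, hq'2⟩ := first_occ_lt rem hpw pre suf w hsp lh hlhmem
                (by omega) hlhnpre
              rcases hmemLR q' hq'mem with hq' | hq'
              · have := hI7 q' hq' rh List.mem_cons_self
                rw [hq'1, h] at this
                omega
              · have := hRfirst q' hq'mem (by rw [hq'1, h])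
                omega
          rw [hrecL hwc]
          simp only [pvBLoop]
          rw [if_pos (Or.inr ⟨hcmp, hidx⟩)]
        · -- rh has the smaller index: A takes rh
          have hwc : w = rh.1 := by
            rcases hwcand with h | h
            · exfalso
              have hrhnpre : rh.1 ∉ pre := by
                intro hh
                have h5 := hpre rh.1 hh
                have h6 : |pos - w| = pos - lh.1 := by rw [h]; exact hdl
                omega
              obtain ⟨q', hq'mem, hq'1, hq'2⟩ := first_occ_lt rem hpw pre suf w hsp rh hrhmem
                (by omega) hrhnpre
              rcases hmemLR q' hq'mem with hq' | hq'
              · have := hLfirst q' hq'mem (by rw [hq'1, h])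
                omega
              · have := hI7 lh List.mem_cons_self q' hq'
                rw [hq'1, h] at this
                omega
            · exact h
          rw [hrecR hwc]
          simp only [pvBLoop]
          rw [if_neg (by rintro (h | ⟨h1, h2⟩) <;> omega)]
      · -- right strictly nearer
        have hwc : w = rh.1 := by
          rw [hdr] at hminrh
          rcases hmemLR wp hwpmem with h | h
          · exfalso
            have h3 := hdiffL wp h
            have h4 := hLle wp h
            rw [← hwp1] at hminrh
            rw [h3] at hminrh
            omega
          · have h3 := hdiffR wp h
            have h4 := hRge wp h
            rw [← hwp1] at hminrh ⊢
            rw [h3] at hminrh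
            omega
        rw [hrecR hwc]
        simp only [pvBLoop]
        rw [if_neg (by rintro (h | ⟨h1, h2⟩) <;> omega)]

-- ===== VERDICT (by name: the statement is the Claim_ definition above) =====
theorem solve_spec : Claim_equal_solve := by
  unfold Claim_equal_solve Spec_solve
  intro elev st _ hpre
  obtain ⟨hb1, hb2⟩ := hpre
  have hrng := PySem.List.pyRange_zero_natCast elev.length
  set rem0 : List (Int × Int) := elev.zip (PySem.List.pyRange 0 (elev.length : Int) 1) with hrem0
  have hlenrng : (PySem.List.pyRange 0 (elev.length : Int) 1).length = elev.length := by
    rw [hrng]; simp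
  have hfst : rem0.map Prod.fst = elev := List.map_fst_zip (by rw [hlenrng])
  have hlen0 : rem0.length = elev.length := by
    rw [hrem0, List.length_zip, hlenrng]; simp
  have hpw0 : rem0.Pairwise (fun a b => a.2 < b.2) := by
    rw [hrem0, hrng, List.pairwise_iff_getElem]
    intro i j hi hj hij
    simp only [List.getElem_zip, List.getElem_map, List.getElem_range]
    exact_mod_cast hij
  have hsnd0 : (rem0.map Prod.snd).Nodup := by
    have hm : rem0.map Prod.snd = PySem.List.pyRange 0 (elev.length : Int) 1 :=
      List.map_snd_zip (by rw [hlenrng])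
    rw [hm, hrng]
    exact List.Nodup.map (fun a b h => by exact_mod_cast h) List.nodup_range
  set pairs : List (Int × Int) :=
    PySem.List.sorted2 rem0 (fun p => p.1) (fun p => p.2) false with hpairs
  have hpermP : pairs.Perm rem0 := PySem.List.sorted2_perm rem0 _ _ false
  have hsndP : (pairs.map Prod.snd).Nodup := ((hpermP.map Prod.snd).nodup_iff).mpr hsnd0
  have hneP : pairs.Pairwise (fun a b => a.2 ≠ b.2) := List.pairwise_map.mp hsndP
  have hlexP : pairs.Pairwise (fun a b => a.1 < b.1 ∨ (a.1 = b.1 ∧ a.2 ≤ b.2)) :=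
    sorted2_pairwise_lexle rem0 _ _
  have hstrict : pairs.Pairwise (fun a b => a.1 < b.1 ∨ (a.1 = b.1 ∧ a.2 < b.2)) :=
    (hlexP.and hneP).imp (fun h => by
      rcases h with ⟨h1 | ⟨h2, h3⟩, h4⟩
      · exact Or.inl h1
      · exact Or.inr ⟨h2, lt_of_le_of_ne h3 h4⟩)
  set P : Int × Int → Bool := fun p => decide (p.1 < st) with hP
  set pref : List (Int × Int) := pairs.takeWhile P with hpref
  set lft : List (Int × Int) := PySem.List.sorted2 pref (fun p => -p.1) (fun p => p.2) false with hlft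
  set rgt : List (Int × Int) := pairs.dropWhile P with hrgt
  have hpermpre : lft.Perm pref := PySem.List.sorted2_perm pref _ _ false
  have hperm : (lft ++ rgt).Perm rem0 := by
    have h1 : (lft ++ rgt).Perm (pref ++ rgt) := hpermpre.append_right rgt
    have h2 : pref ++ rgt = pairs := by
      rw [hpref, hrgt, List.takeWhile_append_dropWhile]
    exact (h2 ▸ h1).trans hpermP
  have hsndL : (lft.map Prod.snd).Nodup := by
    have hsub : (pref.map Prod.snd).Sublist (pairs.map Prod.snd) :=
      (List.takeWhile_sublist P).map Prod.snd
    exact ((hpermpre.map Prod.snd).nodup_iff).mpr (hsndP.sublist hsub)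
  have hlpw : lft.Pairwise (fun a b => b.1 < a.1 ∨ (a.1 = b.1 ∧ a.2 < b.2)) := by
    have hlex := sorted2_pairwise_lexle pref (fun p => -p.1) (fun p => p.2)
    rw [← hlft] at hlex
    have hne := List.pairwise_map.mp hsndL
    exact (hlex.and hne).imp (fun h => by
      rcases h with ⟨h1 | ⟨h2, h3⟩, h4⟩
      · exact Or.inl (by omega)
      · exact Or.inr ⟨by omega, lt_of_le_of_ne h3 h4⟩)
  have hrpw : rgt.Pairwise (fun a b => a.1 < b.1 ∨ (a.1 = b.1 ∧ a.2 < b.2)) :=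
    hstrict.sublist (List.dropWhile_sublist P)
  have hlval : ∀ p ∈ lft, p.1 ≤ st := by
    intro p hp
    have hp' : p ∈ pref := hpermpre.mem_iff.mp hp
    have := List.mem_takeWhile_imp hp'
    rw [hP] at this
    have := of_decide_eq_true this
    omega
  have hrval : ∀ p ∈ rgt, st ≤ p.1 := by
    intro p hp
    rw [hrgt] at hp
    cases hD : pairs.dropWhile P with
    | nil => rw [hD] at hp; cases hp
    | cons d dt =>
      rw [hD] at hp
      have hne0 : pairs.dropWhile P ≠ [] := by rw [hD]; simp
      have hdP := List.head_dropWhile_not P hne0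
      have hhead : (pairs.dropWhile P).head hne0 = d := by simp [hD]
      rw [hhead, hP] at hdP
      have hd : st ≤ d.1 := by
        have := of_decide_eq_false hdP
        omega
      rcases List.mem_cons.mp hp with rfl | hp'
      · exact hd
      · have hPW := hrpw
        rw [hrgt, hD] at hPW
        have := (List.pairwise_cons.mp hPW).1 p hp'
        omega
  have hI7 : ∀ p ∈ lft, ∀ q ∈ rgt, p.1 < q.1 := by
    intro p hp q hq
    have hp' : p ∈ pref := hpermpre.mem_iff.mp hp
    have := List.mem_takeWhile_imp hp'
    rw [hP] at this
    have h1 := of_decide_eq_true this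
    have h2 := hrval q hq
    omega
  have hmemE : ∀ p ∈ rem0, p.1 ∈ elev := by
    intro p hp
    rw [hrem0] at hp
    exact (List.of_mem_zip (a := p.1) (b := p.2) (by simpa using hp)).1
  have hbnd : ∀ p ∈ rem0, |st - p.1| < 99999999 := fun p hp => hb1 p.1 (hmemE p hp)
  have hpairb : ∀ p ∈ rem0, ∀ q ∈ rem0, |p.1 - q.1| < 99999999 :=
    fun p hp q hq => hb2 p.1 (hmemE p hp) q.1 (hmemE q hq)
  have hmain := loop_eq elev.length rem0 lft rgt st 0 hlen0 hpw0 hperm hlpw hrpw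
    hlval hrval hI7 hbnd hpairb
  rw [hfst] at hmain
  exact hmain
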